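-- pv_equiv track=rewrite | github.com/emir01b/python_exercise | recursive.py | negatif_sayi_toplami
-- ===== SOURCE A (Python) =====
-- def negatif_sayi_toplami(dizi):
--     if not dizi:
--         return 0
--     else:
--         ilk_eleman = dizi[0]
--         kalan_dizi = dizi[1:]
--         if ilk_eleman < 0:
--             return ilk_eleman + negatif_sayi_toplami(kalan_dizi)
--         else:
--             return negatif_sayi_toplami(kalan_dizi)
-- ===== SOURCE B (Python) =====
-- def negatif_sayi_toplami(dizi):
--     toplam = 0
--     for eleman in dizi:
--         if eleman < 0:
--             toplam += eleman
--     return toplam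
-- ===== Notes on version B (the rewrite author's own statement) =====
-- stated objective: faster
-- what changed: Replaces the slicing recursion with a single forward loop over an explicit accumulator, avoiding O(n^2) list copies and recursion-depth limits.
import Mathlib
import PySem

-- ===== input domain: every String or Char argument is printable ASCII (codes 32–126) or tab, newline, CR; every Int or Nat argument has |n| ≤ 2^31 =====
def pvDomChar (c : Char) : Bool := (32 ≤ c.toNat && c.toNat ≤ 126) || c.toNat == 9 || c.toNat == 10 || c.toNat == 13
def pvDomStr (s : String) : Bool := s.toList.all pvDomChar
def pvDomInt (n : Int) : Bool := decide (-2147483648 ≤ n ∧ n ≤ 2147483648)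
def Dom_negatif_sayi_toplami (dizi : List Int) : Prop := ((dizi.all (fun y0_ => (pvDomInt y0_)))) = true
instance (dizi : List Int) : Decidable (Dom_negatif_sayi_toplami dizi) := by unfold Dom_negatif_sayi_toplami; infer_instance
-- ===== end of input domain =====

-- B: iterative accumulator loop instead of slicing recursion (one O(n) pass, no list copies)


-- ===== PORT A =====
def negatif_sayi_toplami (dizi : List Int) : Int :=
  match dizi with
  | [] => 0
  | ilk_eleman :: kalan_dizi =>
    if ilk_eleman < 0 then ilk_eleman + negatif_sayi_toplami kalan_dizi
    else negatif_sayi_toplami kalan_dizi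

-- ===== PORT B =====
def negatif_sayi_toplami_alt (dizi : List Int) : Int :=
  dizi.foldl (fun toplam eleman => if eleman < 0 then toplam + eleman else toplam) 0

-- ===== PRECONDITION & SPEC =====
def Spec_negatif_sayi_toplami (dizi : List Int) (out : Int) : Prop := out = negatif_sayi_toplami_alt dizi
instance (dizi : List Int) (out : Int) : Decidable (Spec_negatif_sayi_toplami dizi out) := by unfold Spec_negatif_sayi_toplami; infer_instance

-- ===== CLAIM (what is proved, stated in full; the proofs are below) =====
def Claim_equal_negatif_sayi_toplami : Prop := ∀ (dizi : List Int), Dom_negatif_sayi_toplami dizi → Spec_negatif_sayi_toplami dizi (negatif_sayi_toplami dizi)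

-- ===== LEMMAS AND PROOFS =====

-- ===== VERDICT (by name: the statement is the Claim_ definition above) =====
lemma alt_acc (dizi : List Int) (t : Int) :
    dizi.foldl (fun toplam eleman => if eleman < 0 then toplam + eleman else toplam) t
      = t + negatif_sayi_toplami dizi := by
  induction dizi generalizing t with
  | nil => simp [negatif_sayi_toplami]
  | cons x xs ih =>
    simp only [List.foldl, negatif_sayi_toplami]
    split_ifs <;> rw [ih] <;> ring

-- ===== VERDICT (by name: the statement is the Claim_ definition above) =====
theorem negatif_sayi_toplami_spec : Claim_equal_negatif_sayi_toplami := by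
  intro dizi _
  unfold Spec_negatif_sayi_toplami negatif_sayi_toplami_alt
  rw [alt_acc]; ring
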